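-- pv_equiv track=rewrite | github.com/bondardiana/telegram_messages_analiz | collegium_needs.py | delete_unnessesary
-- ===== SOURCE A (Python) =====
-- def delete_unnessesary(dct):
--     delete_lst = []
--     for el in dct:
--         if len(el.split()) == 1:
--             for els in dct:
--                 if el in els and len(els.split()) != 1:
--                     delete_lst.append(els)
--                     dct[el] += 1
--     for el in delete_lst:
--         if el in dct:
--             del dct[el]
--     return dct
-- ===== SOURCE B (Python) =====
-- def delete_unnessesary(dct):
--     singles = [k for k in dct if len(k.split()) == 1]
--     multis = [k for k in dct if len(k.split()) != 1]
--     result = {}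
--     for k, v in dct.items():
--         if len(k.split()) == 1:
--             result[k] = v + sum(1 for m in multis if k in m)
--         elif not any(s in k for s in singles):
--             result[k] = v
--     return result
-- ===== Notes on version B (the rewrite author's own statement) =====
-- stated objective: simpler
-- what changed: A's nested key-by-key loop that mutates the dict in place (incrementing single-word values, collecting a delete list, then a deletion pass) is replaced by one pass that builds a fresh dict from precomputed single-word/multi-word key lists, keeping a single-word key with its count added and dropping a multi-word key iff some single-word key occurs in it.
import Mathlib
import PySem

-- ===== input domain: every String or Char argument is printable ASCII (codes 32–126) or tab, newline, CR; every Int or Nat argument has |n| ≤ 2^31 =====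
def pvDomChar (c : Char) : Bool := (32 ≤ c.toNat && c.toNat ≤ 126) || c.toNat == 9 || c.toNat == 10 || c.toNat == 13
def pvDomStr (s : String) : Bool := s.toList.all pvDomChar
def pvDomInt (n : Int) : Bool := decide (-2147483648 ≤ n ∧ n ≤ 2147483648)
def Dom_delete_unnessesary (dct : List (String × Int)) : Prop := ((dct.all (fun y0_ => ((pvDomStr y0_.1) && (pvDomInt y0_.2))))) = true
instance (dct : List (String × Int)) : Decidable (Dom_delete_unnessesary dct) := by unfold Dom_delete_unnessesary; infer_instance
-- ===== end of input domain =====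

-- B replaces A's nested mutate-then-delete passes over the dict by one construction of a fresh dict
-- from precomputed single-/multi-word key lists (objective: simpler). A mutates its dict argument in
-- place and B does not; the equivalence proved here is about the RETURN value only.

-- ===== PORT A =====
def delete_unnessesary (dct : List (String × Int)) : List (String × Int) :=
  let d0 : PySem.Dict String Int := PySem.Dict.mk dct
  -- delete_lst = []; for el in dct: …  — the loops only change VALUES of d0, never its key list,
  -- so iterating over the snapshot d0.keys is exact for Python's live iteration over the dict.
  let p1 := d0.keys.foldl (fun (st : List String × PySem.Dict String Int) el =>
      if (PySem.Str.split₀ el).length == 1 then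
        d0.keys.foldl (fun st2 els =>
          if PySem.Str.isIn el els && !((PySem.Str.split₀ els).length == 1) then
            (st2.1 ++ [els], st2.2.modify el 0 (· + 1))
          else st2) st
      else st) ([], d0)
  -- for el in delete_lst: if el in dct: del dct[el]
  let d2 := p1.1.foldl (fun (d : PySem.Dict String Int) el =>
      if d.contains el then d.erase el else d) p1.2
  d2.items

-- ===== PORT B =====
def delete_unnessesary_alt (dct : List (String × Int)) : List (String × Int) :=
  let singles := (dct.map Prod.fst).filter (fun k => (PySem.Str.split₀ k).length == 1)
  let multis := (dct.map Prod.fst).filter (fun k => !((PySem.Str.split₀ k).length == 1))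
  let result := dct.foldl (fun (r : PySem.Dict String Int) kv =>
      if (PySem.Str.split₀ kv.1).length == 1 then
        r.insert kv.1 (kv.2 + ((multis.filter (fun m => PySem.Str.isIn kv.1 m)).length : Int))
      else if !(singles.any (fun s => PySem.Str.isIn s kv.1)) then
        r.insert kv.1 kv.2
      else r) PySem.Dict.empty
  result.items

-- ===== PRECONDITION & SPEC =====
-- dct encodes a Python dict, whose keys are always pairwise distinct; Pre_ states exactly that
-- encoding invariant of the association list (it excludes no actual dict input).
def Pre_delete_unnessesary (dct : List (String × Int)) : Prop := (dct.map Prod.fst).Nodup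
instance (dct : List (String × Int)) : Decidable (Pre_delete_unnessesary dct) := by unfold Pre_delete_unnessesary; infer_instance
def pvWitness_delete_unnessesary : (List (String × Int)) := [("ab", 1), ("x ab y", 2), ("cd", 3)]

def Spec_delete_unnessesary (dct : List (String × Int)) (out : List (String × Int)) : Prop := out = delete_unnessesary_alt dct
instance (dct : List (String × Int)) (out : List (String × Int)) : Decidable (Spec_delete_unnessesary dct out) := by unfold Spec_delete_unnessesary; infer_instance

-- ===== CLAIM (what is proved, stated in full; the proofs are below) =====
def Claim_equal_delete_unnessesary : Prop := ∀ (dct : List (String × Int)), Dom_delete_unnessesary dct → Pre_delete_unnessesary dct → Spec_delete_unnessesary dct (delete_unnessesary dct)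

-- ===== LEMMAS AND PROOFS =====

-- len(k.split()) == 1  ("k is a single word")
def pvSingle (k : String) : Bool := (PySem.Str.split₀ k).length == 1
-- el in els and len(els.split()) != 1  (els is a multi-word key hit by the single word el)
def pvHit (el els : String) : Bool := PySem.Str.isIn el els && !((PySem.Str.split₀ els).length == 1)
-- n repetitions of dct[el] += 1
def pvIncr (el : String) : Nat → PySem.Dict String Int → PySem.Dict String Int
  | 0, d => d
  | n+1, d => pvIncr el n (d.modify el 0 (· + 1))
-- how often A increments the value of the single-word key el
def pvBump (ks : List String) (el : String) : Nat := (ks.filter (pvHit el)).length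
-- A's delete_lst
def pvL (ks : List String) : List String :=
  ks.flatMap (fun el => if pvSingle el then ks.filter (pvHit el) else [])

theorem pv_inner (el : String) (ms : List String) (lst : List String)
    (d : PySem.Dict String Int) :
    ms.foldl (fun st2 els =>
        if PySem.Str.isIn el els && !((PySem.Str.split₀ els).length == 1) then
          (st2.1 ++ [els], st2.2.modify el 0 (· + 1))
        else st2) (lst, d)
      = (lst ++ ms.filter (pvHit el), pvIncr el (ms.filter (pvHit el)).length d) := by
  induction ms generalizing lst d with
  | nil => simp [pvIncr]
  | cons m ms ih =>
    rw [List.foldl_cons]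
    by_cases h : pvHit el m = true
    · have hlit : (PySem.Str.isIn el m && !((PySem.Str.split₀ m).length == 1)) = true := h
      rw [if_pos hlit, ih, List.filter_cons_of_pos h]
      simp [pvIncr]
    · have hlit : ¬ (PySem.Str.isIn el m && !((PySem.Str.split₀ m).length == 1)) = true := h
      rw [if_neg hlit, ih, List.filter_cons_of_neg h]

theorem pv_incr_keys (el : String) (n : Nat) (d : PySem.Dict String Int)
    (h : el ∈ d.keys) : (pvIncr el n d).keys = d.keys := by
  induction n generalizing d with
  | zero => rfl
  | succ n ih =>
    have hc : d.contains el = true := (PySem.Dict.contains_iff_mem_keys d el).mpr h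
    have hk : (d.modify el 0 (· + 1)).keys = d.keys := by
      rw [PySem.Dict.keys_modify, PySem.Dict.keys_insert_of_contains _ _ hc]
    rw [pvIncr, ih _ (by rw [hk]; exact h), hk]

theorem pv_incr_getD (el : String) (n : Nat) (d : PySem.Dict String Int) (k : String) :
    (pvIncr el n d).getD k 0 = d.getD k 0 + (if k = el then (n : Int) else 0) := by
  induction n generalizing d with
  | zero => simp [pvIncr]
  | succ n ih =>
    rw [pvIncr, ih, PySem.Dict.getD_modify]
    by_cases h : k = el
    · simp [h]; omega
    · simp [h]

theorem pv_outer (KS es : List String) (hnd : es.Nodup) (hsub : ∀ e ∈ es, e ∈ KS)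
    (lst : List String) (d : PySem.Dict String Int) (hk : d.keys = KS) :
    (es.foldl (fun (st : List String × PySem.Dict String Int) el =>
        if (PySem.Str.split₀ el).length == 1 then
          KS.foldl (fun st2 els =>
            if PySem.Str.isIn el els && !((PySem.Str.split₀ els).length == 1) then
              (st2.1 ++ [els], st2.2.modify el 0 (· + 1))
            else st2) st
        else st) (lst, d)).1
      = lst ++ es.flatMap (fun el => if pvSingle el then KS.filter (pvHit el) else [])
    ∧ (es.foldl (fun (st : List String × PySem.Dict String Int) el =>
        if (PySem.Str.split₀ el).length == 1 then
          KS.foldl (fun st2 els =>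
            if PySem.Str.isIn el els && !((PySem.Str.split₀ els).length == 1) then
              (st2.1 ++ [els], st2.2.modify el 0 (· + 1))
            else st2) st
        else st) (lst, d)).2.keys = KS
    ∧ ∀ k, (es.foldl (fun (st : List String × PySem.Dict String Int) el =>
        if (PySem.Str.split₀ el).length == 1 then
          KS.foldl (fun st2 els =>
            if PySem.Str.isIn el els && !((PySem.Str.split₀ els).length == 1) then
              (st2.1 ++ [els], st2.2.modify el 0 (· + 1))
            else st2) st
        else st) (lst, d)).2.getD k 0
      = d.getD k 0 + (if pvSingle k = true ∧ k ∈ es then (pvBump KS k : Int) else 0) := by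
  induction es generalizing lst d with
  | nil => exact ⟨by simp, hk, fun k => by simp⟩
  | cons el es ih =>
    have hnd' : es.Nodup := hnd.of_cons
    have hel : el ∉ es := by simpa using (List.nodup_cons.mp hnd).1
    have hsub' : ∀ e ∈ es, e ∈ KS := fun e he => hsub e (List.mem_cons_of_mem _ he)
    by_cases hs : pvSingle el = true
    · have hs' : ((PySem.Str.split₀ el).length == 1) = true := hs
      rw [List.foldl_cons, if_pos hs', pv_inner]
      have hkeys : (pvIncr el ((KS.filter (pvHit el)).length) d).keys = d.keys :=
        pv_incr_keys _ _ _ (by rw [hk]; exact hsub el List.mem_cons_self)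
      obtain ⟨h1, h2, h3⟩ := ih hnd' hsub' (lst ++ KS.filter (pvHit el))
        (pvIncr el ((KS.filter (pvHit el)).length) d) (by rw [hkeys, hk])
      refine ⟨by rw [h1]; simp [hs], h2, fun k => ?_⟩
      rw [h3, pv_incr_getD]
      by_cases hke : k = el
      · subst hke
        simp [hs, hel, pvBump]
      · simp [hke]
    · have hs' : ¬ ((PySem.Str.split₀ el).length == 1) = true := hs
      rw [List.foldl_cons, if_neg hs']
      obtain ⟨h1, h2, h3⟩ := ih hnd' hsub' lst d hk
      refine ⟨by rw [h1]; simp [hs], h2, fun k => ?_⟩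
      rw [h3]
      by_cases hke : k = el
      · subst hke; simp [hs]
      · simp [hke]

theorem pv_phase2 (L : List String) (d : PySem.Dict String Int) :
    (L.foldl (fun (d : PySem.Dict String Int) el =>
        if d.contains el then d.erase el else d) d).items
      = d.items.filter (fun kv => !(L.contains kv.1)) := by
  induction L generalizing d with
  | nil => simp
  | cons el L ih =>
    have hstep : ∀ d' : PySem.Dict String Int,
        (if d'.contains el then d'.erase el else d').items
          = d'.items.filter (fun kv => !(kv.1 == el)) := by
      intro d'
      by_cases hc : d'.contains el = true
      · simp [hc, PySem.Dict.erase]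
      · have hc' : el ∉ d'.keys := fun hm =>
          hc ((PySem.Dict.contains_iff_mem_keys d' el).mpr hm)
        rw [if_neg (by simp_all)]
        rw [eq_comm, List.filter_eq_self]
        intro kv hkv
        simp only [Bool.not_eq_eq_eq_not, Bool.not_true, beq_eq_false_iff_ne, ne_eq]
        intro hke
        exact hc' (by rw [← hke]; exact List.mem_map_of_mem hkv)
    rw [List.foldl_cons, ih, hstep, List.filter_filter]
    apply List.filter_congr
    intro kv _
    by_cases h1 : kv.1 = el <;> by_cases h2 : kv.1 ∈ L <;>
      simp [h1, h2]

theorem pv_bfold (S M : List String) (l : List (String × Int))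
    (r : PySem.Dict String Int) (hnd : (l.map Prod.fst).Nodup)
    (hfresh : ∀ kv ∈ l, r.contains kv.1 = false) :
    (l.foldl (fun (r : PySem.Dict String Int) kv =>
        if (PySem.Str.split₀ kv.1).length == 1 then
          r.insert kv.1 (kv.2 + ((M.filter (fun m => PySem.Str.isIn kv.1 m)).length : Int))
        else if !(S.any (fun s => PySem.Str.isIn s kv.1)) then
          r.insert kv.1 kv.2
        else r) r).items
      = r.items ++ l.filterMap (fun kv =>
          if (PySem.Str.split₀ kv.1).length == 1 then
            some (kv.1, kv.2 + ((M.filter (fun m => PySem.Str.isIn kv.1 m)).length : Int))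
          else if !(S.any (fun s => PySem.Str.isIn s kv.1)) then
            some kv
          else none) := by
  induction l generalizing r with
  | nil => simp
  | cons kv l ih =>
    rw [List.map_cons, List.nodup_cons] at hnd
    obtain ⟨hnotin, hnd'⟩ := hnd
    have hne : ∀ kv' ∈ l, kv'.1 ≠ kv.1 := by
      intro kv' h' he
      exact hnotin (by rw [← he]; exact List.mem_map_of_mem h')
    have hc : r.contains kv.1 = false := hfresh kv List.mem_cons_self
    have hfresh' : ∀ v : Int, ∀ kv' ∈ l, (r.insert kv.1 v).contains kv'.1 = false := by
      intro v kv' h'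
      rw [PySem.Dict.contains_insert]
      simp [hne kv' h', hfresh kv' (List.mem_cons_of_mem _ h')]
    by_cases h1 : ((PySem.Str.split₀ kv.1).length == 1) = true
    · rw [List.foldl_cons, if_pos h1, ih _ hnd' (hfresh' _),
        List.filterMap_cons_some (by rw [if_pos h1]),
        PySem.Dict.items_insert_of_not_contains _ _ hc]
      simp
    · by_cases h2 : (!(S.any (fun s => PySem.Str.isIn s kv.1))) = true
      · rw [List.foldl_cons, if_neg h1, if_pos h2, ih _ hnd' (hfresh' _),
          List.filterMap_cons_some (by rw [if_neg h1, if_pos h2]),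
          PySem.Dict.items_insert_of_not_contains _ _ hc]
        simp
      · rw [List.foldl_cons, if_neg h1, if_neg h2,
          List.filterMap_cons_none (by rw [if_neg h1, if_neg h2]),
          ih _ hnd' (fun kv' h' => hfresh kv' (List.mem_cons_of_mem _ h'))]

theorem pv_mem_L (ks : List String) (k : String) :
    k ∈ pvL ks ↔ (k ∈ ks ∧ pvSingle k = false ∧
      ∃ s ∈ ks, pvSingle s = true ∧ PySem.Str.isIn s k = true) := by
  unfold pvL
  constructor
  · intro hm
    obtain ⟨el, hel, hk⟩ := List.mem_flatMap.mp hm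
    by_cases hs : pvSingle el = true
    · rw [if_pos hs] at hk
      obtain ⟨hkks, hkhit⟩ := List.mem_filter.mp hk
      have h2 := hkhit
      unfold pvHit at h2
      rw [Bool.and_eq_true] at h2
      have h3 : ((PySem.Str.split₀ k).length == 1) = false := by
        simpa using h2.2
      exact ⟨hkks, h3, el, hel, hs, h2.1⟩
    · rw [if_neg hs] at hk
      simp at hk
  · rintro ⟨hkks, hns, s, hs, hss, hin⟩
    refine List.mem_flatMap.mpr ⟨s, hs, ?_⟩
    rw [if_pos hss]
    refine List.mem_filter.mpr ⟨hkks, ?_⟩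
    unfold pvHit
    rw [Bool.and_eq_true]
    have hns' : ((PySem.Str.split₀ k).length == 1) = false := hns
    exact ⟨hin, by rw [hns']; rfl⟩

theorem pv_items_of (d : PySem.Dict String Int) (hnd : d.keys.Nodup) (KS : List String)
    (hk : d.keys = KS) (v : String → Int) (hv : ∀ k, d.getD k 0 = v k) :
    d.items = KS.map (fun k => (k, v k)) := by
  rw [PySem.Dict.items_eq_map_keys _ hnd 0, hk]
  exact List.map_congr_left (fun k _ => by rw [hv k])

theorem pv_assemble (l : List (String × Int)) (g : String → String × Int)
    (p : String × Int → Bool) (F : String × Int → Option (String × Int))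
    (h : ∀ kv ∈ l, (if p (g kv.1) = true then some (g kv.1) else none) = F kv) :
    ((l.map Prod.fst).map g).filter p = l.filterMap F := by
  induction l with
  | nil => rfl
  | cons kv l ih =>
    rw [List.map_cons, List.map_cons]
    have ha := h kv List.mem_cons_self
    by_cases hp : p (g kv.1) = true
    · rw [List.filter_cons_of_pos hp, List.filterMap_cons_some (by rw [← ha, if_pos hp]),
        ih (fun b hb => h b (List.mem_cons_of_mem _ hb))]
    · rw [List.filter_cons_of_neg hp, List.filterMap_cons_none (by rw [← ha, if_neg hp]),
        ih (fun b hb => h b (List.mem_cons_of_mem _ hb))]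

theorem pv_main (dct : List (String × Int)) (hpre : (dct.map Prod.fst).Nodup) :
    delete_unnessesary dct = delete_unnessesary_alt dct := by
  simp only [delete_unnessesary, delete_unnessesary_alt]
  rw [show (PySem.Dict.mk dct).keys = dct.map Prod.fst from rfl]
  have hndK : (PySem.Dict.mk dct).keys.Nodup := hpre
  obtain ⟨h1, h2, h3⟩ := pv_outer (dct.map Prod.fst) (dct.map Prod.fst) hpre
      (fun e he => he) [] (PySem.Dict.mk dct) rfl
  rw [pv_phase2, h1, List.nil_append]
  rw [show (dct.map Prod.fst).flatMap
        (fun el => if pvSingle el then (dct.map Prod.fst).filter (pvHit el) else [])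
      = pvL (dct.map Prod.fst) from rfl]
  rw [pv_items_of _ (by rw [h2]; exact hpre) _ h2
      (fun k => (PySem.Dict.mk dct).getD k 0 +
        (if pvSingle k = true ∧ k ∈ dct.map Prod.fst then (pvBump (dct.map Prod.fst) k : Int) else 0))
      h3]
  rw [pv_bfold _ _ dct PySem.Dict.empty hpre (fun kv _ => PySem.Dict.contains_empty _),
    show (PySem.Dict.empty : PySem.Dict String Int).items = [] from rfl, List.nil_append]
  apply pv_assemble
  intro kv hkv
  show (if (!(pvL (dct.map Prod.fst)).contains kv.1) = true
      then some (kv.1, (PySem.Dict.mk dct).getD kv.1 0 +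
        (if pvSingle kv.1 = true ∧ kv.1 ∈ dct.map Prod.fst
          then (pvBump (dct.map Prod.fst) kv.1 : Int) else 0))
      else none)
    = (if ((PySem.Str.split₀ kv.1).length == 1) = true
       then some (kv.1, kv.2 +
         ((((dct.map Prod.fst).filter (fun k => !((PySem.Str.split₀ k).length == 1))).filter
            (fun m => PySem.Str.isIn kv.1 m)).length : Int))
       else if (!(((dct.map Prod.fst).filter (fun k => (PySem.Str.split₀ k).length == 1)).any
            (fun s => PySem.Str.isIn s kv.1))) = true
         then some kv else none)
  have hk : kv.1 ∈ dct.map Prod.fst := List.mem_map_of_mem hkv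
  have hval : (PySem.Dict.mk dct).getD kv.1 0 = kv.2 :=
    PySem.Dict.getD_of_mem_items _ hkv hndK 0
  rw [hval]
  by_cases hs : pvSingle kv.1 = true
  · have hs' : ((PySem.Str.split₀ kv.1).length == 1) = true := hs
    have hnotmem : kv.1 ∉ pvL (dct.map Prod.fst) := by
      rw [pv_mem_L]
      rintro ⟨-, hfalse, -⟩
      rw [hs] at hfalse
      cases hfalse
    have hc : (pvL (dct.map Prod.fst)).contains kv.1 = false := by simp [hnotmem]
    have hM : ((dct.map Prod.fst).filter (fun k => !((PySem.Str.split₀ k).length == 1))).filter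
          (fun m => PySem.Str.isIn kv.1 m) = (dct.map Prod.fst).filter (pvHit kv.1) := by
      rw [List.filter_filter]
      exact List.filter_congr (fun m _ => by unfold pvHit; rw [Bool.and_comm])
    have hcond : pvSingle kv.1 = true ∧ kv.1 ∈ dct.map Prod.fst := ⟨hs, hk⟩
    have hcondL : (!(pvL (dct.map Prod.fst)).contains kv.1) = true := by rw [hc]; rfl
    rw [if_pos hcondL, if_pos hs', if_pos hcond, hM]
    simp [pvBump]
  · have hsf : pvSingle kv.1 = false := by simpa using hs
    have hs' : ((PySem.Str.split₀ kv.1).length == 1) = false := hsf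
    have hcondM : ¬ (((PySem.Str.split₀ kv.1).length == 1) = true) := by rw [hs']; simp
    have hcondI : ¬ (pvSingle kv.1 = true ∧ kv.1 ∈ dct.map Prod.fst) := fun hx => hs hx.1
    by_cases hany : (((dct.map Prod.fst).filter (fun k => (PySem.Str.split₀ k).length == 1)).any
        (fun s => PySem.Str.isIn s kv.1)) = true
    · obtain ⟨s, hsmem, hsin⟩ := List.any_eq_true.mp hany
      obtain ⟨hsKS, hssingle⟩ := List.mem_filter.mp hsmem
      have hmem : kv.1 ∈ pvL (dct.map Prod.fst) :=
        (pv_mem_L _ _).mpr ⟨hk, hsf, s, hsKS, hssingle, hsin⟩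
      have hc : (pvL (dct.map Prod.fst)).contains kv.1 = true := by simp [hmem]
      have hcondL : ¬ ((!(pvL (dct.map Prod.fst)).contains kv.1) = true) := by rw [hc]; simp
      have hcondA : ¬ ((!(((dct.map Prod.fst).filter (fun k => (PySem.Str.split₀ k).length == 1)).any
          (fun s => PySem.Str.isIn s kv.1))) = true) := by rw [hany]; simp
      rw [if_neg hcondL, if_neg hcondM, if_neg hcondA]
    · have hanyf : (((dct.map Prod.fst).filter (fun k => (PySem.Str.split₀ k).length == 1)).any
          (fun s => PySem.Str.isIn s kv.1)) = false := by simpa using hany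
      have hnm : kv.1 ∉ pvL (dct.map Prod.fst) := by
        rw [pv_mem_L]
        rintro ⟨-, -, s, hsm, hss, hin⟩
        exact hany (List.any_eq_true.mpr ⟨s, List.mem_filter.mpr ⟨hsm, hss⟩, hin⟩)
      have hc : (pvL (dct.map Prod.fst)).contains kv.1 = false := by simp [hnm]
      have hcondL : (!(pvL (dct.map Prod.fst)).contains kv.1) = true := by rw [hc]; rfl
      have hcondA : (!(((dct.map Prod.fst).filter (fun k => (PySem.Str.split₀ k).length == 1)).any
          (fun s => PySem.Str.isIn s kv.1))) = true := by rw [hanyf]; rfl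
      rw [if_pos hcondL, if_neg hcondM, if_pos hcondA, if_neg hcondI]
      simp

-- ===== VERDICT (by name: the statement is the Claim_ definition above) =====
theorem delete_unnessesary_spec : Claim_equal_delete_unnessesary := by
  intro dct _ hpre
  unfold Spec_delete_unnessesary
  exact pv_main dct hpre
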